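-- pv_equiv track=rewrite | github.com/AdrChacon/ChaCa-Progra | Intro y Taller Progra- TEC/Examenes/achacon-parcial2.py | sumacolumnas
-- ===== SOURCE A (Python) =====
-- def sumacolumnas(matriz, fila, columna, maximo, suma, result):
--     if columna == maximo:
--         return True
--     elif fila == maximo and result == suma:
--         return sumacolumnas(matriz,0,columna+1,maximo,suma,0)
--     elif fila == maximo and result != suma:
--         return False
--     else:
--         return sumacolumnas(matriz, fila+1, columna, maximo, suma, result + matriz[fila][columna])
-- ===== SOURCE B (Python) =====
-- def sumacolumnas(matriz, fila, columna, maximo, suma, result):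
--     if columna == maximo:
--         return True
--     primera = result + sum(matriz[f][columna] for f in range(fila, maximo))
--     if primera != suma:
--         return False
--     return all(sum(matriz[f][c] for f in range(maximo)) == suma
--                for c in range(columna + 1, maximo))
-- ===== Notes on version B (the rewrite author's own statement) =====
-- stated objective: simpler
-- what changed: Replaces A's six-state tail recursion with a direct computation: finish the partial first column with sum(), then check every remaining full column with all()/sum(); no recursion and no accumulator threading.
-- outside the precondition, e.g. on sumacolumnas([[1]], 0, 2, 0, 3, 3): A returns False, B returns True
import Mathlib
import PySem

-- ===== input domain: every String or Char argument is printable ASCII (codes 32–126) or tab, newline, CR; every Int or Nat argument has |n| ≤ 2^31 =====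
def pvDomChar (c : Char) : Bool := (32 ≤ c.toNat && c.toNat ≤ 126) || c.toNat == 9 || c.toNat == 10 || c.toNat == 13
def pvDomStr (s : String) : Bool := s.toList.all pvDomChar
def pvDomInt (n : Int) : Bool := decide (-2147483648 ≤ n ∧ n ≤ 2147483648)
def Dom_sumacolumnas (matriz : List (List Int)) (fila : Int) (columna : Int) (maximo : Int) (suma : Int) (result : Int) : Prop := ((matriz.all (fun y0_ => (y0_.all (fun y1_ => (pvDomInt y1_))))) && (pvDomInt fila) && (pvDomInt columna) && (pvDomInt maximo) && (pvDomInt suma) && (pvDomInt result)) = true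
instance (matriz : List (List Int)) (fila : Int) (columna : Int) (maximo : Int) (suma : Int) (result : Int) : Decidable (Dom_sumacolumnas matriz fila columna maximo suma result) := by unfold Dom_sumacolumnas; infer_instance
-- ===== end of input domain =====

-- ===== PORT A =====
-- B is a simpler direct computation (sum/all over columns) replacing A's six-state tail recursion; same return value on Pre_.
-- matriz[f][c]; where Python would raise IndexError this defaults to 0 — Pre_ excludes exactly those inputs.
def pvGet (matriz : List (List Int)) (f c : Int) : Int :=
  ((PySem.List.pyGet? matriz f).bind (fun row => PySem.List.pyGet? row c)).getD 0

-- literal transliteration of A's recursion; the Nat argument is fuel making it total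
-- (under Pre_ the fuel below is always sufficient; where Python diverges/raises the fuel runs out outside Pre_).
def sumacolumnasGo (matriz : List (List Int)) : Int → Int → Int → Int → Int → Nat → Option Bool
  | _, _, _, _, _, 0 => none
  | fila, columna, maximo, suma, result, Nat.succ n =>
    if columna = maximo then some true
    else if fila = maximo ∧ result = suma then
      sumacolumnasGo matriz 0 (columna + 1) maximo suma 0 n
    else if fila = maximo ∧ result ≠ suma then some false
    else sumacolumnasGo matriz (fila + 1) columna maximo suma (result + pvGet matriz fila columna) n

def sumacolumnas (matriz : List (List Int)) (fila : Int) (columna : Int) (maximo : Int) (suma : Int) (result : Int) : Bool :=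
  (sumacolumnasGo matriz fila columna maximo suma result
    ((maximo - columna).toNat * (maximo.toNat + 1) + (maximo - fila).toNat + 1)).getD false

-- ===== PORT B =====
def sumacolumnas_alt (matriz : List (List Int)) (fila : Int) (columna : Int) (maximo : Int) (suma : Int) (result : Int) : Bool :=
  if columna = maximo then true
  else
    let primera := result + ((PySem.List.pyRange fila maximo 1).map (fun f => pvGet matriz f columna)).sum
    if primera ≠ suma then false
    else (PySem.List.pyRange (columna + 1) maximo 1).all
      (fun c => ((PySem.List.pyRange 0 maximo 1).map (fun f => pvGet matriz f c)).sum == suma)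

-- ===== PRECONDITION & SPEC =====
-- Pre_ admits exactly the starts on which A's recursion returns a value, EXCEPT the degenerate starts with
-- columna > maximo whose first-column sum matches suma, where A's eventual False (from leftover accumulator
-- state) and B's vacuous True are equally defensible; everywhere else outside Pre_ A raises (IndexError, or
-- RecursionError because columna resp. fila can never reach maximo). Stated as interval arithmetic over the rows
-- (Python negative-index wraparound included), plus the two ways the run can end: all remaining columns are
-- readable, or the first (partial) column sum already misses suma so A stops before reading further columns.
def Pre_sumacolumnas (matriz : List (List Int)) (fila : Int) (columna : Int) (maximo : Int) (suma : Int) (result : Int) : Prop :=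
  columna = maximo ∨
    (fila ≤ maximo ∧ columna ≠ maximo ∧
     (fila < maximo → (-(matriz.length : Int) ≤ fila ∧ maximo ≤ (matriz.length : Int))) ∧
     (∀ p ∈ matriz.zipIdx,
        ((fila ≤ (p.2 : Int) ∧ (p.2 : Int) < maximo) ∨
         (fila ≤ (p.2 : Int) - (matriz.length : Int) ∧ (p.2 : Int) - (matriz.length : Int) < maximo)) →
          (-(p.1.length : Int) ≤ columna ∧ columna < (p.1.length : Int))) ∧
     ((columna < maximo ∧ (0 ≤ maximo ∨ columna + 1 = maximo) ∧
       (columna + 1 < maximo →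
         (maximo ≤ (matriz.length : Int) ∧
          ∀ p ∈ matriz.zipIdx, (p.2 : Int) < maximo →
            (-(p.1.length : Int) ≤ columna + 1 ∧ maximo ≤ (p.1.length : Int))))) ∨
      result + ((PySem.List.pyRange fila maximo 1).map (fun f => pvGet matriz f columna)).sum ≠ suma))

instance (matriz : List (List Int)) (fila : Int) (columna : Int) (maximo : Int) (suma : Int) (result : Int) : Decidable (Pre_sumacolumnas matriz fila columna maximo suma result) := by unfold Pre_sumacolumnas; infer_instance

def pvWitness_sumacolumnas : List (List Int) × Int × Int × Int × Int × Int := ([[1, 2], [3, 4]], 0, 0, 2, 4, 0)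

def Spec_sumacolumnas (matriz : List (List Int)) (fila : Int) (columna : Int) (maximo : Int) (suma : Int) (result : Int) (out : Bool) : Prop := out = sumacolumnas_alt matriz fila columna maximo suma result
instance (matriz : List (List Int)) (fila : Int) (columna : Int) (maximo : Int) (suma : Int) (result : Int) (out : Bool) : Decidable (Spec_sumacolumnas matriz fila columna maximo suma result out) := by unfold Spec_sumacolumnas; infer_instance

-- ===== CLAIM (what is proved, stated in full; the proofs are below) =====
def Claim_equal_sumacolumnas : Prop := ∀ (matriz : List (List Int)) (fila : Int) (columna : Int) (maximo : Int) (suma : Int) (result : Int), Dom_sumacolumnas matriz fila columna maximo suma result → Pre_sumacolumnas matriz fila columna maximo suma result → Spec_sumacolumnas matriz fila columna maximo suma result (sumacolumnas matriz fila columna maximo suma result)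

-- ===== LEMMAS AND PROOFS =====

-- the part of Pre_ the equality proof needs (cell validity is irrelevant: both ports read via pvGet)
def pvInv (fila columna maximo : Int) : Prop :=
  columna = maximo ∨ (fila ≤ maximo ∧ columna < maximo ∧ (0 ≤ maximo ∨ columna + 1 = maximo))

lemma pvMain (n : Nat) : ∀ (matriz : List (List Int)) (fila columna maximo suma result : Int),
    pvInv fila columna maximo →
    (maximo - columna).toNat * (maximo.toNat + 1) + (maximo - fila).toNat ≤ n →
    sumacolumnasGo matriz fila columna maximo suma result (n + 1)
      = some (sumacolumnas_alt matriz fila columna maximo suma result) := by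
  induction n with
  | zero =>
    intro matriz fila columna maximo suma result hinv hfuel
    rcases hinv with hc | ⟨hf, hc, _⟩
    · simp [sumacolumnasGo, sumacolumnas_alt, hc]
    · exfalso
      have h1 : 1 ≤ (maximo - columna).toNat := by omega
      have h2 : (maximo.toNat + 1) ≤ (maximo - columna).toNat * (maximo.toNat + 1) :=
        Nat.le_mul_of_pos_left _ (by omega)
      omega
  | succ n ih =>
    intro matriz fila columna maximo suma result hinv hfuel
    by_cases hc : columna = maximo
    · simp [sumacolumnasGo, sumacolumnas_alt, hc]
    rcases hinv with hc' | ⟨hf, hclt, hm⟩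
    · exact absurd hc' hc
    by_cases hfe : fila = maximo
    · -- end of a column: first the empty remaining sum, then branch on result = suma
      have hrange : PySem.List.pyRange fila maximo 1 = [] :=
        PySem.List.pyRange_one_eq_nil (by omega)
      by_cases hr : result = suma
      · -- A recurses into the next column
        have hstep : sumacolumnasGo matriz fila columna maximo suma result (n + 1 + 1)
            = sumacolumnasGo matriz 0 (columna + 1) maximo suma 0 (n + 1) := by
          simp [sumacolumnasGo, hc, hfe, hr]
        rw [hstep]
        by_cases hc1 : columna + 1 = maximo
        · -- next column check is vacuous on both sides
          have hA : sumacolumnasGo matriz 0 (columna + 1) maximo suma 0 (n + 1)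
              = some (sumacolumnas_alt matriz 0 (columna + 1) maximo suma 0) := by
            apply ih
            · exact Or.inl hc1
            · have h1 : (maximo - columna).toNat = 1 := by omega
              have h0 : (maximo - (columna + 1)).toNat = 0 := by omega
              have h2 : (maximo - columna).toNat * (maximo.toNat + 1) = maximo.toNat + 1 := by
                rw [h1, one_mul]
              rw [h0, Nat.zero_mul]
              omega
          rw [hA]
          have hrest : PySem.List.pyRange (columna + 1) maximo 1 = [] :=
            PySem.List.pyRange_one_eq_nil (by omega)
          simp [sumacolumnas_alt, hc, hc1, hrange, hr]
        · -- a genuine next column exists; 0 ≤ maximo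
          have hM : 0 ≤ maximo := by rcases hm with h | h; exact h; exact absurd h hc1
          have hA : sumacolumnasGo matriz 0 (columna + 1) maximo suma 0 (n + 1)
              = some (sumacolumnas_alt matriz 0 (columna + 1) maximo suma 0) := by
            apply ih
            · exact Or.inr ⟨by omega, by omega, Or.inl hM⟩
            · have h1 : (maximo - columna).toNat = (maximo - (columna + 1)).toNat + 1 := by omega
              have h2 : (maximo - columna).toNat * (maximo.toNat + 1)
                  = (maximo - (columna + 1)).toNat * (maximo.toNat + 1) + (maximo.toNat + 1) := by
                rw [h1, Nat.succ_mul]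
              omega
          rw [hA]
          -- B at (0, columna+1, 0) equals B at (maximo, columna, suma)
          have hcons : PySem.List.pyRange (columna + 1) maximo 1
              = (columna + 1) :: PySem.List.pyRange (columna + 1 + 1) maximo 1 :=
            PySem.List.pyRange_one_cons (by omega)
          by_cases hS : ((PySem.List.pyRange 0 maximo 1).map (fun f => pvGet matriz f (columna + 1))).sum = suma
          · simp [sumacolumnas_alt, hc, hc1, hrange, hcons, hr, hS]
          · simp [sumacolumnas_alt, hc, hc1, hrange, hcons, hr, hS]
      · -- column sum misses suma: both return false
        have hA : sumacolumnasGo matriz fila columna maximo suma result (n + 1 + 1) = some false := by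
          simp [sumacolumnasGo, hc, hfe, hr]
        rw [hA]
        simp [sumacolumnas_alt, hc, hrange, hr]
    · -- one more row of the current column
      have hstep : sumacolumnasGo matriz fila columna maximo suma result (n + 1 + 1)
          = sumacolumnasGo matriz (fila + 1) columna maximo suma
              (result + pvGet matriz fila columna) (n + 1) := by
        simp [sumacolumnasGo, hc, hfe]
      rw [hstep]
      have hflt : fila < maximo := lt_of_le_of_ne hf hfe
      have hA : sumacolumnasGo matriz (fila + 1) columna maximo suma
            (result + pvGet matriz fila columna) (n + 1)
          = some (sumacolumnas_alt matriz (fila + 1) columna maximo suma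
              (result + pvGet matriz fila columna)) := by
        apply ih
        · exact Or.inr ⟨by omega, hclt, hm⟩
        · omega
      rw [hA]
      have hcons : PySem.List.pyRange fila maximo 1
          = fila :: PySem.List.pyRange (fila + 1) maximo 1 :=
        PySem.List.pyRange_one_cons hflt
      have hsum : result + ((PySem.List.pyRange fila maximo 1).map (fun f => pvGet matriz f columna)).sum
          = (result + pvGet matriz fila columna)
            + ((PySem.List.pyRange (fila + 1) maximo 1).map (fun f => pvGet matriz f columna)).sum := by
        rw [hcons]; simp [add_assoc]
      simp only [sumacolumnas_alt, if_neg hc]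
      rw [hsum]

lemma pvFalse (n : Nat) : ∀ (matriz : List (List Int)) (fila columna maximo suma result : Int),
    fila ≤ maximo → columna ≠ maximo →
    result + ((PySem.List.pyRange fila maximo 1).map (fun f => pvGet matriz f columna)).sum ≠ suma →
    (maximo - fila).toNat ≤ n →
    sumacolumnasGo matriz fila columna maximo suma result (n + 1) = some false := by
  induction n with
  | zero =>
    intro matriz fila columna maximo suma result hf hc hsum hn
    have hfe : fila = maximo := by omega
    rw [PySem.List.pyRange_one_eq_nil (by omega)] at hsum
    simp only [List.map_nil, List.sum_nil, add_zero] at hsum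
    simp [sumacolumnasGo, hc, hfe, hsum]
  | succ n ih =>
    intro matriz fila columna maximo suma result hf hc hsum hn
    by_cases hfe : fila = maximo
    · rw [PySem.List.pyRange_one_eq_nil (by omega)] at hsum
      simp only [List.map_nil, List.sum_nil, add_zero] at hsum
      simp [sumacolumnasGo, hc, hfe, hsum]
    · have hflt : fila < maximo := lt_of_le_of_ne hf hfe
      have hstep : sumacolumnasGo matriz fila columna maximo suma result (n + 1 + 1)
          = sumacolumnasGo matriz (fila + 1) columna maximo suma
              (result + pvGet matriz fila columna) (n + 1) := by
        simp [sumacolumnasGo, hc, hfe]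
      rw [hstep]
      apply ih matriz (fila + 1) columna maximo suma _ (by omega) hc ?_ (by omega)
      rw [PySem.List.pyRange_one_cons hflt] at hsum
      simp only [List.map_cons, List.sum_cons] at hsum
      rw [add_assoc]
      exact hsum

-- ===== VERDICT (by name: the statement is the Claim_ definition above) =====
theorem sumacolumnas_spec : Claim_equal_sumacolumnas := by
  intro matriz fila columna maximo suma result _hdom hpre
  unfold Spec_sumacolumnas sumacolumnas
  rcases hpre with hc | ⟨h1, hc, _h3, _h4, hend⟩
  · rw [pvMain _ matriz fila columna maximo suma result (Or.inl hc) (le_refl _)]; rfl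
  rcases hend with ⟨h2, hm, _⟩ | hsum
  · rw [pvMain _ matriz fila columna maximo suma result (Or.inr ⟨h1, h2, hm⟩) (le_refl _)]; rfl
  · rw [pvFalse _ matriz fila columna maximo suma result h1 hc hsum (Nat.le_add_left _ _)]
    simp [sumacolumnas_alt, hc, hsum]
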